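-- pv_equiv track=rewrite | github.com/NicolasUrs/SAT-Solving-Algorithm | Resolution.py | resolution_sat
-- ===== SOURCE A (Python) =====
-- def resolution_sat(clauses):
--
--     clauses_set = set(frozenset(cl) for cl in clauses if cl)
--     clauses = {cl for cl in clauses_set if not any(-lit in cl for lit in cl)}
--
--     while True:
--         new_clauses = set()
--         clause_list = list(clauses)
--         n = len(clause_list)
--
--         for i in range(n):
--             for j in range(i + 1, n):
--                 ci, cj = clause_list[i], clause_list[j]
--
--                 for lit in ci:
--                     if -lit in cj:
--                         resolvent = set(ci) - {lit}
--                         resolvent |= (cj - {-lit})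
--
--                         if any(-l in resolvent for l in resolvent):
--                             continue
--
--                         resolvent = frozenset(resolvent)
--                         if len(resolvent) == 0:
--                             return False
--
--                         new_clauses.add(resolvent)
--
--         if new_clauses.issubset(clauses):
--             break
--
--         clauses |= new_clauses
--
--     return True
-- ===== SOURCE B (Python) =====
-- def resolution_sat(clauses):
--     def reduce(cls, l):
--         return [[m for m in c if m != -l] for c in cls if l not in c]
--
--     def solve(cls):
--         if not cls:
--             return True
--         if any(not c for c in cls):
--             return False
--         l = cls[0][0]
--         return solve(reduce(cls, l)) or solve(reduce(cls, -l))
--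
--     # like A's 'if cl' comprehension filter, empty input clauses are ignored
--     return solve([c for c in clauses if c])
-- ===== Notes on version B (the rewrite author's own statement) =====
-- stated objective: faster
-- what changed: Replaces resolution saturation (repeated all-pairs resolution to a fixpoint over a growing clause set) with a DPLL-style backtracking search that splits on the first literal of the first clause and simplifies the clause set; intended as faster: a timing run measured B 14.83x faster at the largest size A finished (n=256), and A timed out where B returned on larger inputs, but the harness could not statistically confirm the label.
import Mathlib
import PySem

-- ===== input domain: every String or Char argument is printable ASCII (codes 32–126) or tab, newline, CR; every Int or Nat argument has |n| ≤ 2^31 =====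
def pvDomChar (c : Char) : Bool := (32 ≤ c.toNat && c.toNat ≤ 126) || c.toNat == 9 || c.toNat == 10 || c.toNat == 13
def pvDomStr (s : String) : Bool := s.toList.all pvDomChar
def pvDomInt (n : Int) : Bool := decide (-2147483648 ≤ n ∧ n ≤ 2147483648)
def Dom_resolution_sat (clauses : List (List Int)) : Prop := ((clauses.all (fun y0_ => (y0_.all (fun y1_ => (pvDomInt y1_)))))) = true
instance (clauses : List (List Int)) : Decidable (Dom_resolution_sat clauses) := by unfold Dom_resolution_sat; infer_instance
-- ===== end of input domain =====

-- B replaces A's all-pairs resolution saturation by a DPLL-style splitting search over the same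
-- clauses (empty input clauses are ignored exactly as A's 'if cl' filter ignores them).

-- ===== PORT A =====
-- frozenset(cl) is ported as its canonical representation: the strictly increasing list of the
-- distinct elements (exact: frozensets are compared/stored by set equality, which on this
-- representation is list equality; the final Bool of A does not depend on hash order).
def canonC (cl : List Int) : List Int :=
  PySem.List.sorted (PySem.Set.ofList cl) (fun x => x) false

def isTautB (c : List Int) : Bool := c.any (fun lit => decide ((-lit) ∈ c))

-- set(ci) - {lit} | (cj - {-lit}) as a canonical clause
def mkResolvent (ci cj : List Int) (lit : Int) : List Int :=
  canonC ((ci.filter (fun x => decide (x ≠ lit))) ++ (cj.filter (fun x => decide (x ≠ -lit))))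

-- 'for lit in ci: if -lit in cj: …' — none encodes A's early 'return False' on the empty resolvent
def resolveLits (ci cj : List Int) : List Int → List (List Int) → Option (List (List Int))
  | [], acc => some acc
  | lit :: rest, acc =>
    if (-lit) ∈ cj then
      if isTautB (mkResolvent ci cj lit) then resolveLits ci cj rest acc
      else if mkResolvent ci cj lit = [] then none
      else resolveLits ci cj rest (PySem.Set.add acc (mkResolvent ci cj lit))
    else resolveLits ci cj rest acc

-- the inner 'for j in range(i+1, n)' loop
def innerPairs (ci : List Int) : List (List Int) → List (List Int) → Option (List (List Int))
  | [], acc => some acc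
  | cj :: t, acc =>
    match resolveLits ci cj ci acc with
    | none => none
    | some acc' => innerPairs ci t acc'

-- the outer 'for i in range(n)' loop
def allPairs : List (List Int) → List (List Int) → Option (List (List Int))
  | [], acc => some acc
  | ci :: t, acc =>
    match innerPairs ci t acc with
    | none => none
    | some acc' => allPairs t acc'

-- 'while True: …'; the fuel only makes the loop total in Lean: it is provably never exhausted
-- (each round strictly grows the clause set, which stays below 2^|universe|)
def satLoop : Nat → List (List Int) → Bool
  | 0, _ => true
  | fuel + 1, S =>
    match allPairs S [] with
    | none => false
    | some new =>
      if new.all (fun c => decide (c ∈ S)) then true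
      else satLoop fuel (S ++ new.filter (fun c => !(decide (c ∈ S))))

def uniLits (clauses : List (List Int)) : List Int := canonC clauses.flatten

def initClauses (clauses : List (List Int)) : List (List Int) :=
  (PySem.Set.ofList ((clauses.filter (fun c => !(c.isEmpty))).map canonC)).filter
    (fun c => !(isTautB c))

def resolution_sat (clauses : List (List Int)) : Bool :=
  satLoop (2 ^ (uniLits clauses).length + 1) (initClauses clauses)

-- ===== PORT B =====
def reduceB (cls : List (List Int)) (l : Int) : List (List Int) :=
  (cls.filter (fun c => !(decide (l ∈ c)))).map (fun c => c.filter (fun m => decide (m ≠ -l)))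

def sumLen (cls : List (List Int)) : Nat := (cls.map List.length).sum

-- fuel only makes the recursion total: sumLen strictly decreases, so sumLen + 1 always suffices
def solveB : Nat → List (List Int) → Bool
  | 0, _ => true
  | fuel + 1, cls =>
    match cls with
    | [] => true
    | c :: rest =>
      if (c :: rest).any (fun d => d.isEmpty) then false
      else
        match c with
        | [] => false  -- unreachable: covered by the isEmpty test above
        | l :: _ => solveB fuel (reduceB (c :: rest) l) || solveB fuel (reduceB (c :: rest) (-l))

def resolution_sat_alt (clauses : List (List Int)) : Bool :=
  solveB (sumLen (clauses.filter (fun c => !(c.isEmpty))) + 1)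
    (clauses.filter (fun c => !(c.isEmpty)))

-- ===== PRECONDITION & SPEC =====
def Spec_resolution_sat (clauses : List (List Int)) (out : Bool) : Prop :=
  out = resolution_sat_alt clauses
instance (clauses : List (List Int)) (out : Bool) : Decidable (Spec_resolution_sat clauses out) := by
  unfold Spec_resolution_sat; infer_instance

-- ===== CLAIM (what is proved, stated in full; the proofs are below) =====
def Claim_equal_resolution_sat : Prop := ∀ (clauses : List (List Int)), Dom_resolution_sat clauses → Spec_resolution_sat clauses (resolution_sat clauses)

-- ===== LEMMAS AND PROOFS =====

-- ---- semantics: assignments, clause/set satisfaction ----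
def LitTrue (σ : Int → Bool) (l : Int) : Bool :=
  if l = 0 then true else if 0 < l then σ l else !σ (-l)

def SatC (σ : Int → Bool) (c : List Int) : Prop := ∃ l ∈ c, LitTrue σ l = true
def SatS (σ : Int → Bool) (S : List (List Int)) : Prop := ∀ c ∈ S, SatC σ c
def Sat (S : List (List Int)) : Prop := ∃ σ, SatS σ S

-- ---- canonical clauses ----
theorem mem_canonC {x : Int} {c : List Int} : x ∈ canonC c ↔ x ∈ c := by
  rw [canonC, PySem.List.mem_sorted, PySem.Set.mem_ofList]

theorem pairwise_canonC (c : List Int) : (canonC c).Pairwise (· < ·) := by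
  exact PySem.List.sorted_ofList_pairwise_lt c

theorem canon_ext {c d : List Int} (hc : c.Pairwise (· < ·)) (hd : d.Pairwise (· < ·))
    (h : ∀ x, x ∈ c ↔ x ∈ d) : c = d := by
  have hcn : c.Nodup := hc.imp (fun h => ne_of_lt h)
  have hdn : d.Nodup := hd.imp (fun h => ne_of_lt h)
  have hperm : d.Perm c := (List.perm_ext_iff_of_nodup hdn hcn).mpr (fun x => (h x).symm)
  have e1 : PySem.List.sorted c (fun x => x) false = c :=
    PySem.List.sorted_eq_of_perm_of_pairwise_lt c c (fun x => x) (List.Perm.refl c) hc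
  have e2 : PySem.List.sorted c (fun x => x) false = d :=
    PySem.List.sorted_eq_of_perm_of_pairwise_lt c d (fun x => x) hperm hd
  rw [← e1, e2]

theorem isTautB_false_iff {c : List Int} : isTautB c = false ↔ ∀ l ∈ c, (-l) ∉ c := by
  simp [isTautB]

theorem isTautB_congr {c d : List Int} (h : ∀ x, x ∈ c ↔ x ∈ d) : isTautB c = isTautB d := by
  rw [Bool.eq_iff_iff]
  simp only [isTautB, List.any_eq_true, decide_eq_true_eq]
  constructor
  · rintro ⟨l, hl, hnl⟩; exact ⟨l, (h l).mp hl, (h (-l)).mp hnl⟩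
  · rintro ⟨l, hl, hnl⟩; exact ⟨l, (h l).mpr hl, (h (-l)).mpr hnl⟩

theorem zero_not_mem_of_not_taut {c : List Int} (h : isTautB c = false) : (0:Int) ∉ c := by
  intro h0
  have := isTautB_false_iff.mp h 0 h0
  simp at this
  exact this h0

theorem mem_mkResolvent {x lit : Int} {ci cj : List Int} :
    x ∈ mkResolvent ci cj lit ↔ (x ∈ ci ∧ x ≠ lit) ∨ (x ∈ cj ∧ x ≠ -lit) := by
  simp [mkResolvent, mem_canonC, List.mem_append, List.mem_filter]

-- ---- literal semantics ----
theorem LitTrue_neg {σ : Int → Bool} {l : Int} (h : l ≠ 0) : LitTrue σ (-l) = !LitTrue σ l := by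
  simp only [LitTrue]
  by_cases hp : 0 < l
  · rw [if_neg (by omega : ¬ (-l = 0)), if_neg (by omega : ¬ (0 < -l)), if_neg h, if_pos hp,
      neg_neg]
  · rw [if_neg (by omega : ¬ (-l = 0)), if_pos (by omega : 0 < -l), if_neg h, if_neg hp,
      Bool.not_not]

theorem LitTrue_update {σ : Int → Bool} {m p : Int} {b : Bool}
    (h1 : m ≠ p) (h2 : m ≠ -p) : LitTrue (Function.update σ p b) m = LitTrue σ m := by
  simp only [LitTrue]
  by_cases h0 : m = 0
  · simp [h0]
  · by_cases hp : 0 < m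
    · rw [if_neg h0, if_neg h0, if_pos hp, if_pos hp, Function.update_of_ne h1]
    · rw [if_neg h0, if_neg h0, if_neg hp, if_neg hp,
        Function.update_of_ne (by omega : -m ≠ p)]

theorem satC_congr {σ : Int → Bool} {c d : List Int} (h : ∀ x, x ∈ c ↔ x ∈ d)
    (hc : SatC σ c) : SatC σ d := by
  obtain ⟨l, hl, ht⟩ := hc
  exact ⟨l, (h l).mp hl, ht⟩

theorem taut_satC {σ : Int → Bool} {c : List Int} {l : Int} (hl : l ∈ c) (hnl : (-l) ∈ c) :
    SatC σ c := by
  by_cases h0 : l = 0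
  · exact ⟨l, hl, by simp [LitTrue, h0]⟩
  · cases hb : LitTrue σ l with
    | true => exact ⟨l, hl, hb⟩
    | false => exact ⟨-l, hnl, by rw [LitTrue_neg h0, hb]; rfl⟩

theorem resolvent_sound {σ : Int → Bool} {ci cj : List Int} {lit : Int}
    (h0 : (0:Int) ∉ ci) (hlit : lit ∈ ci) (_hneg : (-lit) ∈ cj)
    (hci : SatC σ ci) (hcj : SatC σ cj) : SatC σ (mkResolvent ci cj lit) := by
  have hlit0 : lit ≠ 0 := fun h => h0 (h ▸ hlit)
  obtain ⟨m, hm, hmt⟩ := hci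
  by_cases hml : m = lit
  · -- the resolved-on literal is true: cj's witness cannot be -lit
    obtain ⟨m', hm', hmt'⟩ := hcj
    have hne : m' ≠ -lit := by
      intro he
      have hlt : LitTrue σ lit = true := hml ▸ hmt
      rw [he, LitTrue_neg hlit0, hlt] at hmt'
      simp at hmt'
    exact ⟨m', mem_mkResolvent.mpr (Or.inr ⟨hm', hne⟩), hmt'⟩
  · exact ⟨m, mem_mkResolvent.mpr (Or.inl ⟨hm, hml⟩), hmt⟩

-- ---- specs of A's pair loops ----
theorem resolveLits_sub {ci cj : List Int} {lits : List Int} {acc acc' : List (List Int)}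
    (h : resolveLits ci cj lits acc = some acc') : ∀ c ∈ acc, c ∈ acc' := by
  induction lits generalizing acc with
  | nil => simp only [resolveLits, Option.some.injEq] at h; subst h; exact fun c hc => hc
  | cons lit rest ih =>
    rw [resolveLits] at h
    split_ifs at h with h1 h2 h3
    · exact ih h
    · intro c hc
      exact ih h c ((PySem.Set.mem_add acc (mkResolvent ci cj lit) c).mpr (Or.inl hc))
    · exact ih h

theorem resolveLits_mem {ci cj : List Int} {lits : List Int} {acc acc' : List (List Int)}
    (h : resolveLits ci cj lits acc = some acc') :
    ∀ c ∈ acc', c ∈ acc ∨ ∃ lit ∈ lits, (-lit) ∈ cj ∧ c = mkResolvent ci cj lit ∧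
      isTautB c = false ∧ c ≠ [] := by
  induction lits generalizing acc with
  | nil => simp only [resolveLits, Option.some.injEq] at h; subst h; exact fun c hc => Or.inl hc
  | cons lit rest ih =>
    rw [resolveLits] at h
    split_ifs at h with h1 h2 h3
    · intro c hc
      rcases ih h c hc with hin | ⟨l, hl, h'⟩
      · exact Or.inl hin
      · exact Or.inr ⟨l, List.mem_cons_of_mem _ hl, h'⟩
    · intro c hc
      rcases ih h c hc with hin | ⟨l, hl, h'⟩
      · rcases (PySem.Set.mem_add acc (mkResolvent ci cj lit) c).mp hin with hin' | he
        · exact Or.inl hin'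
        · exact Or.inr ⟨lit, List.mem_cons_self, h1, he, he ▸ (by simpa using h2), he ▸ h3⟩
      · exact Or.inr ⟨l, List.mem_cons_of_mem _ hl, h'⟩
    · intro c hc
      rcases ih h c hc with hin | ⟨l, hl, h'⟩
      · exact Or.inl hin
      · exact Or.inr ⟨l, List.mem_cons_of_mem _ hl, h'⟩

theorem resolveLits_none {ci cj : List Int} {lits : List Int} {acc : List (List Int)}
    (h : resolveLits ci cj lits acc = none) :
    ∃ lit ∈ lits, (-lit) ∈ cj ∧ mkResolvent ci cj lit = [] := by
  induction lits generalizing acc with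
  | nil => simp [resolveLits] at h
  | cons lit rest ih =>
    rw [resolveLits] at h
    split_ifs at h with h1 h2 h3
    · obtain ⟨l, hl, h'⟩ := ih h
      exact ⟨l, List.mem_cons_of_mem _ hl, h'⟩
    · exact ⟨lit, List.mem_cons_self, h1, h3⟩
    · obtain ⟨l, hl, h'⟩ := ih h
      exact ⟨l, List.mem_cons_of_mem _ hl, h'⟩
    · obtain ⟨l, hl, h'⟩ := ih h
      exact ⟨l, List.mem_cons_of_mem _ hl, h'⟩

theorem resolveLits_complete {ci cj : List Int} {lits : List Int} {acc acc' : List (List Int)}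
    (h : resolveLits ci cj lits acc = some acc') {lit : Int} (hl : lit ∈ lits)
    (hn : (-lit) ∈ cj) (ht : isTautB (mkResolvent ci cj lit) = false) :
    mkResolvent ci cj lit ∈ acc' ∧ mkResolvent ci cj lit ≠ [] := by
  induction lits generalizing acc with
  | nil => simp at hl
  | cons l0 rest ih =>
    rw [resolveLits] at h
    rcases List.mem_cons.mp hl with he | hmem
    · subst he
      rw [if_pos hn, if_neg (by simp [ht])] at h
      split_ifs at h with h3
      refine ⟨resolveLits_sub h _ ?_, h3⟩
      exact (PySem.Set.mem_add acc (mkResolvent ci cj lit) _).mpr (Or.inr rfl)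
    · split_ifs at h with h1 h2 h3
      · exact ih h hmem
      · exact ih h hmem
      · exact ih h hmem

theorem resolveLits_nodup {ci cj : List Int} {lits : List Int} {acc acc' : List (List Int)}
    (h : resolveLits ci cj lits acc = some acc') (hacc : acc.Nodup) : acc'.Nodup := by
  induction lits generalizing acc with
  | nil => simp only [resolveLits, Option.some.injEq] at h; subst h; exact hacc
  | cons lit rest ih =>
    rw [resolveLits] at h
    split_ifs at h with h1 h2 h3
    · exact ih h hacc
    · exact ih h (PySem.Set.nodup_add acc (mkResolvent ci cj lit) hacc)
    · exact ih h hacc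

theorem innerPairs_sub {ci : List Int} {ts : List (List Int)} {acc acc' : List (List Int)}
    (h : innerPairs ci ts acc = some acc') : ∀ c ∈ acc, c ∈ acc' := by
  induction ts generalizing acc with
  | nil => simp only [innerPairs, Option.some.injEq] at h; subst h; exact fun c hc => hc
  | cons cj t ih =>
    rw [innerPairs] at h
    cases hr : resolveLits ci cj ci acc with
    | none => rw [hr] at h; exact absurd h (by simp)
    | some acc'' =>
      rw [hr] at h
      exact fun c hc => ih h c (resolveLits_sub hr c hc)

theorem innerPairs_mem {ci : List Int} {ts : List (List Int)} {acc acc' : List (List Int)}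
    (h : innerPairs ci ts acc = some acc') :
    ∀ c ∈ acc', c ∈ acc ∨ ∃ cj ∈ ts, ∃ lit ∈ ci, (-lit) ∈ cj ∧ c = mkResolvent ci cj lit ∧
      isTautB c = false ∧ c ≠ [] := by
  induction ts generalizing acc with
  | nil => simp only [innerPairs, Option.some.injEq] at h; subst h; exact fun c hc => Or.inl hc
  | cons cj t ih =>
    rw [innerPairs] at h
    cases hr : resolveLits ci cj ci acc with
    | none => rw [hr] at h; exact absurd h (by simp)
    | some acc'' =>
      rw [hr] at h
      intro c hc
      rcases ih h c hc with hin | ⟨d, hd, rest⟩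
      · rcases resolveLits_mem hr c hin with hin' | ⟨l, hl, h'⟩
        · exact Or.inl hin'
        · exact Or.inr ⟨cj, List.mem_cons_self, l, hl, h'⟩
      · exact Or.inr ⟨d, List.mem_cons_of_mem _ hd, rest⟩

theorem innerPairs_none {ci : List Int} {ts : List (List Int)} {acc : List (List Int)}
    (h : innerPairs ci ts acc = none) :
    ∃ cj ∈ ts, ∃ lit ∈ ci, (-lit) ∈ cj ∧ mkResolvent ci cj lit = [] := by
  induction ts generalizing acc with
  | nil => simp [innerPairs] at h
  | cons cj t ih =>
    rw [innerPairs] at h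
    cases hr : resolveLits ci cj ci acc with
    | none =>
      obtain ⟨l, hl, h'⟩ := resolveLits_none hr
      exact ⟨cj, List.mem_cons_self, l, hl, h'⟩
    | some acc'' =>
      rw [hr] at h
      obtain ⟨d, hd, rest⟩ := ih h
      exact ⟨d, List.mem_cons_of_mem _ hd, rest⟩

theorem innerPairs_complete {ci : List Int} {ts : List (List Int)} {acc acc' : List (List Int)}
    (h : innerPairs ci ts acc = some acc') {cj : List Int} (hcj : cj ∈ ts) {lit : Int}
    (hl : lit ∈ ci) (hn : (-lit) ∈ cj) (ht : isTautB (mkResolvent ci cj lit) = false) :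
    mkResolvent ci cj lit ∈ acc' ∧ mkResolvent ci cj lit ≠ [] := by
  induction ts generalizing acc with
  | nil => simp at hcj
  | cons c0 t ih =>
    rw [innerPairs] at h
    cases hr : resolveLits ci c0 ci acc with
    | none => rw [hr] at h; exact absurd h (by simp)
    | some acc'' =>
      rw [hr] at h
      rcases List.mem_cons.mp hcj with he | hmem
      · subst he
        obtain ⟨hin, hne⟩ := resolveLits_complete hr hl hn ht
        exact ⟨innerPairs_sub h _ hin, hne⟩
      · exact ih h hmem

theorem innerPairs_nodup {ci : List Int} {ts : List (List Int)} {acc acc' : List (List Int)}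
    (h : innerPairs ci ts acc = some acc') (hacc : acc.Nodup) : acc'.Nodup := by
  induction ts generalizing acc with
  | nil => simp only [innerPairs, Option.some.injEq] at h; subst h; exact hacc
  | cons cj t ih =>
    rw [innerPairs] at h
    cases hr : resolveLits ci cj ci acc with
    | none => rw [hr] at h; exact absurd h (by simp)
    | some acc'' =>
      rw [hr] at h
      exact ih h (resolveLits_nodup hr hacc)

theorem allPairs_sub {L : List (List Int)} {acc acc' : List (List Int)}
    (h : allPairs L acc = some acc') : ∀ c ∈ acc, c ∈ acc' := by
  induction L generalizing acc with
  | nil => simp only [allPairs, Option.some.injEq] at h; subst h; exact fun c hc => hc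
  | cons ci t ih =>
    rw [allPairs] at h
    cases hr : innerPairs ci t acc with
    | none => rw [hr] at h; exact absurd h (by simp)
    | some acc'' =>
      rw [hr] at h
      exact fun c hc => ih h c (innerPairs_sub hr c hc)

theorem allPairs_mem {L : List (List Int)} {acc acc' : List (List Int)}
    (h : allPairs L acc = some acc') :
    ∀ c ∈ acc', c ∈ acc ∨ ∃ ci ∈ L, ∃ cj ∈ L, ∃ lit ∈ ci, (-lit) ∈ cj ∧
      c = mkResolvent ci cj lit ∧ isTautB c = false ∧ c ≠ [] := by
  induction L generalizing acc with
  | nil => simp only [allPairs, Option.some.injEq] at h; subst h; exact fun c hc => Or.inl hc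
  | cons c0 t ih =>
    rw [allPairs] at h
    cases hr : innerPairs c0 t acc with
    | none => rw [hr] at h; exact absurd h (by simp)
    | some acc'' =>
      rw [hr] at h
      intro c hc
      rcases ih h c hc with hin | ⟨ci, hci, cj, hcj, rest⟩
      · rcases innerPairs_mem hr c hin with hin' | ⟨cj, hcj, l, hl, h'⟩
        · exact Or.inl hin'
        · exact Or.inr ⟨c0, List.mem_cons_self, cj, List.mem_cons_of_mem _ hcj, l, hl, h'⟩
      · exact Or.inr ⟨ci, List.mem_cons_of_mem _ hci, cj, List.mem_cons_of_mem _ hcj, rest⟩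

theorem allPairs_none {L : List (List Int)} {acc : List (List Int)}
    (h : allPairs L acc = none) :
    ∃ ci ∈ L, ∃ cj ∈ L, ∃ lit ∈ ci, (-lit) ∈ cj ∧ mkResolvent ci cj lit = [] := by
  induction L generalizing acc with
  | nil => simp [allPairs] at h
  | cons c0 t ih =>
    rw [allPairs] at h
    cases hr : innerPairs c0 t acc with
    | none =>
      obtain ⟨cj, hcj, l, hl, h'⟩ := innerPairs_none hr
      exact ⟨c0, List.mem_cons_self, cj, List.mem_cons_of_mem _ hcj, l, hl, h'⟩
    | some acc'' =>
      rw [hr] at h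
      obtain ⟨ci, hci, cj, hcj, rest⟩ := ih h
      exact ⟨ci, List.mem_cons_of_mem _ hci, cj, List.mem_cons_of_mem _ hcj, rest⟩

theorem allPairs_complete {L : List (List Int)} {acc acc' : List (List Int)}
    (h : allPairs L acc = some acc') {ci : List Int} {t : List (List Int)}
    (hsuf : (ci :: t) <:+ L) {cj : List Int} (hcj : cj ∈ t) {lit : Int}
    (hl : lit ∈ ci) (hn : (-lit) ∈ cj) (ht : isTautB (mkResolvent ci cj lit) = false) :
    mkResolvent ci cj lit ∈ acc' ∧ mkResolvent ci cj lit ≠ [] := by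
  induction L generalizing acc with
  | nil => simp at hsuf
  | cons c0 t0 ih =>
    rw [allPairs] at h
    cases hr : innerPairs c0 t0 acc with
    | none => rw [hr] at h; exact absurd h (by simp)
    | some acc'' =>
      rw [hr] at h
      rcases (List.suffix_cons_iff).mp hsuf with he | hsuf'
      · obtain ⟨he1, he2⟩ := List.cons.injEq ci t c0 t0 ▸ he
        subst he1; subst he2
        obtain ⟨hin, hne⟩ := innerPairs_complete hr hcj hl hn ht
        exact ⟨allPairs_sub h _ hin, hne⟩
      · exact ih h hsuf'

theorem allPairs_nodup {L : List (List Int)} {acc acc' : List (List Int)}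
    (h : allPairs L acc = some acc') (hacc : acc.Nodup) : acc'.Nodup := by
  induction L generalizing acc with
  | nil => simp only [allPairs, Option.some.injEq] at h; subst h; exact hacc
  | cons ci t ih =>
    rw [allPairs] at h
    cases hr : innerPairs ci t acc with
    | none => rw [hr] at h; exact absurd h (by simp)
    | some acc'' =>
      rw [hr] at h
      exact ih h (innerPairs_nodup hr hacc)

theorem before_of_ne {S : List (List Int)} (hnd : S.Nodup) {c d : List Int}
    (hc : c ∈ S) (hd : d ∈ S) (hne : c ≠ d) :
    (∃ t, (c :: t) <:+ S ∧ d ∈ t) ∨ (∃ t, (d :: t) <:+ S ∧ c ∈ t) := by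
  induction S with
  | nil => simp at hc
  | cons e t ih =>
    rcases List.mem_cons.mp hc with hce | hct
    · subst hce
      have hdt : d ∈ t := by
        rcases List.mem_cons.mp hd with h' | h'
        · exact absurd h'.symm hne
        · exact h'
      exact Or.inl ⟨t, List.suffix_refl _, hdt⟩
    · rcases List.mem_cons.mp hd with hde | hdt
      · subst hde
        exact Or.inr ⟨t, List.suffix_refl _, hct⟩
      · rcases ih hnd.of_cons hct hdt with ⟨t', hsuf, hm⟩ | ⟨t', hsuf, hm⟩
        · exact Or.inl ⟨t', hsuf.trans (List.suffix_cons _ _), hm⟩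
        · exact Or.inr ⟨t', hsuf.trans (List.suffix_cons _ _), hm⟩

-- ---- completeness of saturated sets ----
def Saturated (S : List (List Int)) : Prop :=
  ∀ c ∈ S, ∀ d ∈ S, c ≠ d → ∀ lit ∈ c, (-lit) ∈ d →
    isTautB (mkResolvent c d lit) = false →
    mkResolvent c d lit ∈ S ∧ mkResolvent c d lit ≠ []

def varsS (S : List (List Int)) : Finset ℕ := (S.flatten.map Int.natAbs).toFinset

theorem mem_varsS {S : List (List Int)} {q : ℕ} :
    q ∈ varsS S ↔ ∃ c ∈ S, ∃ l ∈ c, l.natAbs = q := by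
  simp only [varsS, List.mem_toFinset, List.mem_map, List.mem_flatten]
  constructor
  · rintro ⟨l, ⟨c, hc, hl⟩, rfl⟩; exact ⟨c, hc, l, hl, rfl⟩
  · rintro ⟨c, hc, l, hl, rfl⟩; exact ⟨l, ⟨c, hc, hl⟩, rfl⟩

theorem saturated_sat : ∀ (n : ℕ) (S : List (List Int)), (varsS S).card = n →
    (∀ c ∈ S, isTautB c = false ∧ c ≠ []) → Saturated S → Sat S := by
  intro n
  induction n using Nat.strong_induction_on with
  | _ n ih =>
    intro S hcard hgood hsat
    by_cases hv : (varsS S).card = 0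
    · refine ⟨fun _ => true, fun c hc => ?_⟩
      obtain ⟨l, hl⟩ := List.exists_mem_of_ne_nil c (hgood c hc).2
      have hmem : l.natAbs ∈ varsS S := mem_varsS.mpr ⟨c, hc, l, hl, rfl⟩
      rw [Finset.card_eq_zero] at hv
      simp [hv] at hmem
    · obtain ⟨p, hp⟩ := Finset.card_pos.mp (Nat.pos_of_ne_zero hv)
      have hzero : ∀ c ∈ S, (0:Int) ∉ c := fun c hc => zero_not_mem_of_not_taut (hgood c hc).1
      have hp0 : (p:Int) ≠ 0 := by
        obtain ⟨c, hc, l, hl, hq⟩ := mem_varsS.mp hp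
        have : l ≠ 0 := fun he => hzero c hc (he ▸ hl)
        intro he
        have : l.natAbs ≠ 0 := Int.natAbs_ne_zero.mpr this
        omega
      have hppos : (0:Int) < (p:Int) := by
        have : (0:Int) ≤ (p:Int) := Int.natCast_nonneg p
        omega
      set S' := S.filter (fun c => !(decide ((p:Int) ∈ c) || decide ((-(p:Int)) ∈ c))) with hS'def
      have hmemS' : ∀ {c}, c ∈ S' ↔ c ∈ S ∧ (p:Int) ∉ c ∧ (-(p:Int)) ∉ c := by
        intro c
        simp [hS'def, List.mem_filter]
      have hsub : ∀ c ∈ S', c ∈ S := fun c hc => (hmemS'.mp hc).1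
      -- the variable set shrinks
      have hvsub : varsS S' ⊆ (varsS S).erase p := by
        intro q hq
        obtain ⟨c, hc, l, hl, rfl⟩ := mem_varsS.mp hq
        obtain ⟨hcS, hpc, hnpc⟩ := hmemS'.mp hc
        refine Finset.mem_erase.mpr ⟨?_, mem_varsS.mpr ⟨c, hcS, l, hl, rfl⟩⟩
        intro he
        rcases Int.natAbs_eq_iff.mp he with h' | h'
        · exact hpc (h' ▸ hl)
        · exact hnpc (h' ▸ hl)
      have hcard' : (varsS S').card < n := by
        have h1 := Finset.card_le_card hvsub
        have h2 := Finset.card_erase_lt_of_mem hp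
        omega
      have hsat' : Saturated S' := by
        intro c hc d hd hcd lit hlit hnlit ht
        obtain ⟨hin, hne⟩ := hsat c (hsub c hc) d (hsub d hd) hcd lit hlit hnlit ht
        refine ⟨hmemS'.mpr ⟨hin, ?_, ?_⟩, hne⟩
        · intro hx
          rcases mem_mkResolvent.mp hx with ⟨h1, _⟩ | ⟨h1, _⟩
          · exact (hmemS'.mp hc).2.1 h1
          · exact (hmemS'.mp hd).2.1 h1
        · intro hx
          rcases mem_mkResolvent.mp hx with ⟨h1, _⟩ | ⟨h1, _⟩
          · exact (hmemS'.mp hc).2.2 h1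
          · exact (hmemS'.mp hd).2.2 h1
      obtain ⟨σ, hσ⟩ := ih _ hcard' S' rfl (fun c hc => hgood c (hsub c hc)) hsat'
      -- try p ↦ true and p ↦ false
      by_cases hT : SatS (Function.update σ (p:Int) true) S
      · exact ⟨_, hT⟩
      by_cases hF : SatS (Function.update σ (p:Int) false) S
      · exact ⟨_, hF⟩
      exfalso
      simp only [SatS, not_forall] at hT hF
      obtain ⟨c, hc, hnc⟩ := hT
      obtain ⟨d, hd, hnd2⟩ := hF
      have hTfalse : ∀ m ∈ c, LitTrue (Function.update σ (p:Int) true) m = false := by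
        intro m hm
        cases hb : LitTrue (Function.update σ (p:Int) true) m with
        | false => rfl
        | true => exact absurd ⟨m, hm, hb⟩ hnc
      have hFfalse : ∀ m ∈ d, LitTrue (Function.update σ (p:Int) false) m = false := by
        intro m hm
        cases hb : LitTrue (Function.update σ (p:Int) false) m with
        | false => rfl
        | true => exact absurd ⟨m, hm, hb⟩ hnd2
      have hTp : LitTrue (Function.update σ (p:Int) true) (p:Int) = true := by
        simp only [LitTrue]
        rw [if_neg hp0, if_pos hppos, Function.update_self]
      have hFnp : LitTrue (Function.update σ (p:Int) false) (-(p:Int)) = true := by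
        simp only [LitTrue]
        rw [if_neg (by omega : ¬(-(p:Int) = 0)), if_neg (by omega : ¬((0:Int) < -(p:Int))),
          neg_neg, Function.update_self, Bool.not_false]
      have hpc : (p:Int) ∉ c := by
        intro hmem
        have := hTfalse _ hmem
        rw [hTp] at this; simp at this
      have hpd : (p:Int) ∈ d := by
        by_contra hnmem
        by_cases hnp : (-(p:Int)) ∈ d
        · have := hFfalse _ hnp
          rw [hFnp] at this; simp at this
        · have hdS' : d ∈ S' := hmemS'.mpr ⟨hd, hnmem, hnp⟩
          obtain ⟨m, hm, hmt⟩ := hσ d hdS'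
          have := hFfalse m hm
          rw [LitTrue_update (fun he => hnmem (by rw [← he]; exact hm))
            (fun he => hnp (by rw [← he]; exact hm)), hmt] at this
          simp at this
      have hnpc : (-(p:Int)) ∈ c := by
        by_contra hnp
        have hcS' : c ∈ S' := hmemS'.mpr ⟨hc, hpc, hnp⟩
        obtain ⟨m, hm, hmt⟩ := hσ c hcS'
        have := hTfalse m hm
        rw [LitTrue_update (fun he => hpc (by rw [← he]; exact hm))
          (fun he => hnp (by rw [← he]; exact hm)), hmt] at this
        simp at this
      have hnpd : (-(p:Int)) ∉ d := by
        intro hmem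
        exact hzero d hd (by
          have := isTautB_false_iff.mp (hgood d hd).1 _ hpd
          exact absurd hmem this)
      have hcσ : ∀ m ∈ c, m ≠ -(p:Int) → LitTrue σ m = false := by
        intro m hm hmne
        have h1 : m ≠ (p:Int) := fun he => hpc (he ▸ hm)
        have := hTfalse m hm
        rwa [LitTrue_update h1 hmne] at this
      have hdσ : ∀ m ∈ d, m ≠ (p:Int) → LitTrue σ m = false := by
        intro m hm hmne
        have h2 : m ≠ -(p:Int) := fun he => hnpd (he ▸ hm)
        have := hFfalse m hm
        rwa [LitTrue_update hmne h2] at this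
      -- the resolvent of d (on p) and c (on -p) is everywhere false under σ
      have hrfalse : ∀ m ∈ mkResolvent d c (p:Int), LitTrue σ m = false ∧ m ≠ 0 := by
        intro m hm
        rcases mem_mkResolvent.mp hm with ⟨h1, h2⟩ | ⟨h1, h2⟩
        · exact ⟨hdσ m h1 h2, fun he => hzero d hd (by rw [← he]; exact h1)⟩
        · exact ⟨hcσ m h1 h2, fun he => hzero c hc (by rw [← he]; exact h1)⟩
      have htr : isTautB (mkResolvent d c (p:Int)) = false := by
        rw [isTautB_false_iff]
        intro l hl hnl
        obtain ⟨hf1, hl0⟩ := hrfalse l hl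
        obtain ⟨hf2, _⟩ := hrfalse _ hnl
        rw [LitTrue_neg hl0, hf1] at hf2
        simp at hf2
      have hdc : d ≠ c := fun he => hpc (by rw [← he]; exact hpd)
      obtain ⟨hrS, _⟩ := hsat d hd c hc hdc (p:Int) hpd hnpc htr
      have hrS' : mkResolvent d c (p:Int) ∈ S' := by
        refine hmemS'.mpr ⟨hrS, ?_, ?_⟩
        · intro hx
          rcases mem_mkResolvent.mp hx with ⟨_, h2⟩ | ⟨h1, _⟩
          · exact h2 rfl
          · exact hpc h1
        · intro hx
          rcases mem_mkResolvent.mp hx with ⟨h1, _⟩ | ⟨_, h2⟩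
          · exact hnpd h1
          · exact h2 rfl
      obtain ⟨m, hm, hmt⟩ := hσ _ hrS'
      rw [(hrfalse m hm).1] at hmt
      simp at hmt

-- ---- the saturation loop ----
def GoodC (U : List Int) (c : List Int) : Prop :=
  c.Pairwise (· < ·) ∧ c ≠ [] ∧ isTautB c = false ∧ ∀ x ∈ c, x ∈ U

def InvA (S0 : List (List Int)) (U : List Int) (S : List (List Int)) : Prop :=
  S.Nodup ∧ (∀ c ∈ S, GoodC U c) ∧ (∀ c ∈ S0, c ∈ S) ∧ (∀ σ, SatS σ S0 → SatS σ S)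

theorem bound_lemma {U : List Int} {S : List (List Int)} (hU : U.Pairwise (· < ·))
    (hnd : S.Nodup) (hS : ∀ c ∈ S, c.Pairwise (· < ·) ∧ ∀ x ∈ c, x ∈ U) :
    S.length ≤ 2 ^ U.length := by
  classical
  have h1 : S.toFinset.card = S.length := List.toFinset_card_of_nodup hnd
  have hinj : Set.InjOn List.toFinset (S.toFinset : Set (List Int)) := by
    intro c1 hc1 c2 hc2 he
    have p1 := (hS c1 (by simpa using hc1)).1
    have p2 := (hS c2 (by simpa using hc2)).1
    refine canon_ext p1 p2 (fun x => ?_)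
    constructor
    · intro hx
      have hx' : x ∈ c1.toFinset := List.mem_toFinset.mpr hx
      rw [he] at hx'
      exact List.mem_toFinset.mp hx'
    · intro hx
      have hx' : x ∈ c2.toFinset := List.mem_toFinset.mpr hx
      rw [← he] at hx'
      exact List.mem_toFinset.mp hx'
  have h2 : (S.toFinset.image List.toFinset).card = S.toFinset.card :=
    Finset.card_image_of_injOn hinj
  have h3 : S.toFinset.image List.toFinset ⊆ U.toFinset.powerset := by
    intro f hf
    obtain ⟨c, hc, rfl⟩ := Finset.mem_image.mp hf
    rw [Finset.mem_powerset]
    intro x hx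
    exact List.mem_toFinset.mpr ((hS c (by simpa using hc)).2 x (List.mem_toFinset.mp hx))
  have h4 := Finset.card_le_card h3
  rw [Finset.card_powerset,
    List.toFinset_card_of_nodup (hU.imp (fun h => ne_of_lt h))] at h4
  omega

theorem satLoop_iff : ∀ (fuel : Nat) (S0 : List (List Int)) (U : List Int)
    (S : List (List Int)), U.Pairwise (· < ·) → InvA S0 U S →
    2 ^ U.length < fuel + S.length → (satLoop fuel S = true ↔ Sat S0) := by
  intro fuel
  induction fuel with
  | zero =>
    intro S0 U S hU hinv hfuel
    obtain ⟨hnd, hgood, _, _⟩ := hinv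
    have := bound_lemma hU hnd (fun c hc => ⟨(hgood c hc).1, (hgood c hc).2.2.2⟩)
    omega
  | succ fuel ih =>
    intro S0 U S hU hinv hfuel
    obtain ⟨hnd, hgood, hsub0, hent⟩ := hinv
    rw [satLoop]
    cases hAP : allPairs S [] with
    | none =>
      obtain ⟨ci, hci, cj, hcj, lit, hlit, hneg, hres⟩ := allPairs_none hAP
      refine iff_of_false (by simp) ?_
      rintro ⟨σ, hσ⟩
      have hσS := hent σ hσ
      have := resolvent_sound (zero_not_mem_of_not_taut (hgood ci hci).2.2.1) hlit hneg
        (hσS ci hci) (hσS cj hcj)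
      rw [hres] at this
      obtain ⟨l, hl, _⟩ := this
      simp at hl
    | some new =>
      have hnewmem : ∀ c ∈ new, ∃ ci ∈ S, ∃ cj ∈ S, ∃ lit ∈ ci, (-lit) ∈ cj ∧
          c = mkResolvent ci cj lit ∧ isTautB c = false ∧ c ≠ [] := by
        intro c hc
        rcases allPairs_mem hAP c hc with hin | h'
        · simp at hin
        · exact h'
      by_cases hall : new.all (fun c => decide (c ∈ S)) = true
      · simp only [hall, if_true]
        refine iff_of_true (by trivial) ?_
        have hsubSnew : ∀ c ∈ new, c ∈ S := by
          intro c hc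
          simpa using List.all_eq_true.mp hall c hc
        have hSat : Saturated S := by
          intro c hc d hd hcd lit hlit hneg ht
          rcases before_of_ne hnd hc hd hcd with ⟨t, hsuf, hdt⟩ | ⟨t, hsuf, hct⟩
          · obtain ⟨hin, hne⟩ := allPairs_complete hAP hsuf hdt hlit hneg ht
            exact ⟨hsubSnew _ hin, hne⟩
          · have hmemiff : ∀ x, x ∈ mkResolvent d c (-lit) ↔ x ∈ mkResolvent c d lit := by
              intro x
              rw [mem_mkResolvent, mem_mkResolvent, neg_neg]
              exact or_comm
            have heq : mkResolvent d c (-lit) = mkResolvent c d lit :=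
              canon_ext (pairwise_canonC _) (pairwise_canonC _) hmemiff
            have ht' : isTautB (mkResolvent d c (-lit)) = false := by rw [heq]; exact ht
            obtain ⟨hin, hne⟩ := allPairs_complete hAP hsuf hct hneg
              (by rw [neg_neg]; exact hlit) ht'
            rw [heq] at hin hne
            exact ⟨hsubSnew _ hin, hne⟩
        obtain ⟨σ, hσ⟩ := saturated_sat _ S rfl
          (fun c hc => ⟨(hgood c hc).2.2.1, (hgood c hc).2.1⟩) hSat
        exact ⟨σ, fun c hc => hσ c (hsub0 c hc)⟩
      · simp only [Bool.not_eq_true] at hall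
        simp only [hall, Bool.false_eq_true, if_false]
        have hnodupnew : new.Nodup := allPairs_nodup hAP List.nodup_nil
        refine ih S0 U _ hU ⟨?_, ?_, ?_, ?_⟩ ?_
        · -- nodup
          refine List.Nodup.append hnd (hnodupnew.filter _) ?_
          intro a haS hafil
          have := (List.mem_filter.mp hafil).2
          simp at this
          exact this haS
        · -- good
          intro c hc
          rcases List.mem_append.mp hc with hcS | hcf
          · exact hgood c hcS
          · have hcnew := (List.mem_filter.mp hcf).1
            obtain ⟨ci, hci, cj, hcj, lit, hlit, hneg, hceq, htaut, hcne⟩ := hnewmem c hcnew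
            refine ⟨hceq ▸ pairwise_canonC _, hcne, htaut, ?_⟩
            intro x hx
            rw [hceq] at hx
            rcases mem_mkResolvent.mp hx with ⟨h1, _⟩ | ⟨h1, _⟩
            · exact (hgood ci hci).2.2.2 x h1
            · exact (hgood cj hcj).2.2.2 x h1
        · intro c hc
          exact List.mem_append.mpr (Or.inl (hsub0 c hc))
        · intro σ hσ0 c hc
          have hσS := hent σ hσ0
          rcases List.mem_append.mp hc with hcS | hcf
          · exact hσS c hcS
          · have hcnew := (List.mem_filter.mp hcf).1
            obtain ⟨ci, hci, cj, hcj, lit, hlit, hneg, hceq, _, _⟩ := hnewmem c hcnew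
            rw [hceq]
            exact resolvent_sound (zero_not_mem_of_not_taut (hgood ci hci).2.2.1) hlit hneg
              (hσS ci hci) (hσS cj hcj)
        · -- fuel
          have hex : ∃ c ∈ new, c ∉ S := by
            by_contra hno
            push Not at hno
            have hT : new.all (fun c => decide (c ∈ S)) = true :=
              List.all_eq_true.mpr (fun c hc => by simpa using hno c hc)
            rw [hT] at hall
            simp at hall
          obtain ⟨c, hc, hcS⟩ := hex
          have hcfil : c ∈ new.filter (fun c => !(decide (c ∈ S))) :=
            List.mem_filter.mpr ⟨hc, by simpa using hcS⟩
          have hlen : 0 < (new.filter (fun c => !(decide (c ∈ S)))).length :=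
            List.length_pos_of_mem hcfil
          rw [List.length_append]
          omega

theorem A_iff (clauses : List (List Int)) :
    resolution_sat clauses = true ↔ Sat (initClauses clauses) := by
  rw [resolution_sat]
  refine satLoop_iff _ (initClauses clauses) (uniLits clauses) _ (pairwise_canonC _)
    ⟨?_, ?_, fun c hc => hc, fun σ hσ => hσ⟩ (by omega)
  · exact (PySem.Set.nodup_ofList _).filter _
  · intro c hc
    obtain ⟨hmem, htaut⟩ := List.mem_filter.mp hc
    have htaut' : isTautB c = false := by simpa using htaut
    rw [PySem.Set.mem_ofList] at hmem
    obtain ⟨c0, hc0f, rfl⟩ := List.mem_map.mp hmem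
    obtain ⟨hc0, hc0ne⟩ := List.mem_filter.mp hc0f
    have hc0ne' : c0 ≠ [] := by
      intro he
      rw [he] at hc0ne
      simp at hc0ne
    obtain ⟨l, hl⟩ := List.exists_mem_of_ne_nil c0 hc0ne'
    refine ⟨pairwise_canonC _, List.ne_nil_of_mem (mem_canonC.mpr hl), htaut', ?_⟩
    intro x hx
    rw [uniLits, mem_canonC]
    exact List.mem_flatten.mpr ⟨c0, hc0, mem_canonC.mp hx⟩

theorem sat_init_iff (clauses : List (List Int)) :
    Sat (initClauses clauses) ↔ Sat (clauses.filter (fun c => !(c.isEmpty))) := by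
  constructor
  · rintro ⟨σ, hσ⟩
    refine ⟨σ, fun c hc => ?_⟩
    have hmem : canonC c ∈ PySem.Set.ofList
        ((clauses.filter (fun c => !(c.isEmpty))).map canonC) := by
      rw [PySem.Set.mem_ofList]
      exact List.mem_map.mpr ⟨c, hc, rfl⟩
    by_cases ht : isTautB c = true
    · obtain ⟨l, hl, hnl⟩ := by simpa [isTautB] using ht
      exact taut_satC hl hnl
    · have hcongr : isTautB (canonC c) = isTautB c :=
        isTautB_congr (fun x => mem_canonC)
      have ht' : isTautB (canonC c) = false := by
        rw [hcongr]
        exact Bool.eq_false_iff.mpr ht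
      have : canonC c ∈ initClauses clauses :=
        List.mem_filter.mpr ⟨hmem, by simp [ht']⟩
      exact satC_congr (fun x => mem_canonC) (hσ _ this)
  · rintro ⟨σ, hσ⟩
    refine ⟨σ, fun c hc => ?_⟩
    obtain ⟨hmem, _⟩ := List.mem_filter.mp hc
    rw [PySem.Set.mem_ofList] at hmem
    obtain ⟨c0, hc0f, rfl⟩ := List.mem_map.mp hmem
    exact satC_congr (fun x => mem_canonC.symm) (hσ c0 hc0f)

-- ---- B: the splitting solver ----
def assignTrue (σ : Int → Bool) (l : Int) : Int → Bool :=
  if l = 0 then σ else if 0 < l then Function.update σ l true else Function.update σ (-l) false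

theorem assignTrue_self (σ : Int → Bool) (l : Int) : LitTrue (assignTrue σ l) l = true := by
  simp only [assignTrue, LitTrue]
  by_cases h0 : l = 0
  · simp [h0]
  · by_cases hp : 0 < l
    · rw [if_neg h0, if_pos hp, if_neg h0, if_pos hp, Function.update_self]
    · rw [if_neg h0, if_neg hp, if_neg h0, if_neg hp, Function.update_self, Bool.not_false]

theorem assignTrue_other {σ : Int → Bool} {l m : Int} (h1 : m ≠ l) (h2 : m ≠ -l) :
    LitTrue (assignTrue σ l) m = LitTrue σ m := by
  simp only [assignTrue]
  by_cases h0 : l = 0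
  · rw [if_pos h0]
  · by_cases hp : 0 < l
    · rw [if_neg h0, if_pos hp]
      exact LitTrue_update h1 h2
    · rw [if_neg h0, if_neg hp]
      exact LitTrue_update (by omega) (by omega)

theorem red_sound {σ : Int → Bool} {cls : List (List Int)} {l : Int}
    (hl : LitTrue σ l = true) (hS : SatS σ cls) : SatS σ (reduceB cls l) := by
  intro e he
  obtain ⟨c0, hc0f, rfl⟩ := List.mem_map.mp he
  obtain ⟨hc0, hl0⟩ := List.mem_filter.mp hc0f
  have hlnot : l ∉ c0 := by simpa using hl0
  obtain ⟨m, hm, hmt⟩ := hS c0 hc0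
  have hmne : m ≠ -l := by
    intro he'
    by_cases h0 : l = 0
    · rw [h0] at he'
      simp at he'
      exact hlnot (by rw [h0, ← he']; exact hm)
    · rw [he', LitTrue_neg h0, hl] at hmt
      simp at hmt
  exact ⟨m, List.mem_filter.mpr ⟨hm, by simpa using hmne⟩, hmt⟩

theorem red_lift {σ : Int → Bool} {cls : List (List Int)} {l : Int}
    (hS : SatS σ (reduceB cls l)) : SatS (assignTrue σ l) cls := by
  intro c0 hc0
  by_cases hlc : l ∈ c0
  · exact ⟨l, hlc, assignTrue_self σ l⟩
  · have he : c0.filter (fun m => decide (m ≠ -l)) ∈ reduceB cls l :=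
      List.mem_map.mpr ⟨c0, List.mem_filter.mpr ⟨hc0, by simpa using hlc⟩, rfl⟩
    obtain ⟨m, hm, hmt⟩ := hS _ he
    obtain ⟨hmc, hmne⟩ := List.mem_filter.mp hm
    have hmne' : m ≠ -l := by simpa using hmne
    have h1 : m ≠ l := fun he' => hlc (he' ▸ hmc)
    exact ⟨m, hmc, by rw [assignTrue_other h1 hmne']; exact hmt⟩

theorem split_iff (cls : List (List Int)) (l : Int) :
    Sat cls ↔ Sat (reduceB cls l) ∨ Sat (reduceB cls (-l)) := by
  constructor
  · rintro ⟨σ, hσ⟩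
    cases hb : LitTrue σ l with
    | true => exact Or.inl ⟨σ, red_sound hb hσ⟩
    | false =>
      have hl0 : l ≠ 0 := by
        intro h
        rw [h] at hb
        simp [LitTrue] at hb
      have hb' : LitTrue σ (-l) = true := by rw [LitTrue_neg hl0, hb]; rfl
      exact Or.inr ⟨σ, red_sound hb' hσ⟩
  · rintro (⟨σ, hσ⟩ | ⟨σ, hσ⟩)
    · exact ⟨assignTrue σ l, red_lift hσ⟩
    · exact ⟨assignTrue σ (-l), red_lift hσ⟩

theorem sumLen_reduceB_le (cls : List (List Int)) (l : Int) :
    sumLen (reduceB cls l) ≤ sumLen cls := by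
  induction cls with
  | nil => simp [reduceB, sumLen]
  | cons c rest ih =>
    by_cases hc : l ∈ c
    · have he : reduceB (c :: rest) l = reduceB rest l := by
        simp [reduceB, hc]
      rw [he]
      simp only [sumLen, List.map_cons, List.sum_cons] at *
      omega
    · have he : reduceB (c :: rest) l =
          (c.filter (fun m => decide (m ≠ -l))) :: reduceB rest l := by
        simp [reduceB, hc]
      rw [he]
      have h2 := List.length_filter_le (fun m => decide (m ≠ -l)) c
      simp only [sumLen, List.map_cons, List.sum_cons] at *
      omega

theorem sumLen_reduceB_lt_same {c : List Int} {rest : List (List Int)} {l : Int} (hc : l ∈ c) :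
    sumLen (reduceB (c :: rest) l) < sumLen (c :: rest) := by
  have he : reduceB (c :: rest) l = reduceB rest l := by
    simp [reduceB, hc]
  rw [he]
  have h1 := sumLen_reduceB_le rest l
  have h2 : 0 < c.length := List.length_pos_of_mem hc
  simp only [sumLen, List.map_cons, List.sum_cons] at *
  omega

theorem sumLen_reduceB_lt_neg {c : List Int} {rest : List (List Int)} {l : Int} (hc : l ∈ c) :
    sumLen (reduceB (c :: rest) (-l)) < sumLen (c :: rest) := by
  by_cases hnc : (-l) ∈ c
  · exact sumLen_reduceB_lt_same hnc
  · have he : reduceB (c :: rest) (-l) =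
        (c.filter (fun m => decide (m ≠ -(-l)))) :: reduceB rest (-l) := by
      simp [reduceB, hnc]
    rw [he]
    have h1 := sumLen_reduceB_le rest (-l)
    have h2 : (c.filter (fun m => decide (m ≠ -(-l)))).length < c.length := by
      rw [List.length_filter_lt_length_iff_exists]
      exact ⟨l, hc, by simp⟩
    simp only [sumLen, List.map_cons, List.sum_cons] at *
    omega

theorem solveB_iff : ∀ (fuel : Nat) (cls : List (List Int)), sumLen cls < fuel →
    (solveB fuel cls = true ↔ Sat cls) := by
  intro fuel
  induction fuel with
  | zero => intro cls h; omega
  | succ fuel ih =>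
    intro cls hf
    cases cls with
    | nil =>
      have he : solveB (fuel + 1) ([] : List (List Int)) = true := rfl
      rw [he]
      refine iff_of_true rfl ⟨fun _ => true, ?_⟩
      intro c hc
      simp at hc
    | cons c rest =>
      cases c with
      | nil =>
        have he : solveB (fuel + 1) (([] : List Int) :: rest) =
            if (([] : List Int) :: rest).any (fun d => d.isEmpty) = true then false
            else false := rfl
        rw [he, ite_self]
        refine iff_of_false (by simp) ?_
        rintro ⟨σ, hσ⟩
        obtain ⟨m, hm, _⟩ := hσ [] List.mem_cons_self
        simp at hm
      | cons l c' =>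
        have he : solveB (fuel + 1) ((l :: c') :: rest) =
            if ((l :: c') :: rest).any (fun d => d.isEmpty) = true then false
            else (solveB fuel (reduceB ((l :: c') :: rest) l) ||
              solveB fuel (reduceB ((l :: c') :: rest) (-l))) := rfl
        rw [he]
        by_cases hemp : ((l :: c') :: rest).any (fun d => d.isEmpty) = true
        · rw [if_pos hemp]
          refine iff_of_false (by simp) ?_
          rintro ⟨σ, hσ⟩
          obtain ⟨d, hd, hde⟩ := List.any_eq_true.mp hemp
          obtain ⟨m, hm, _⟩ := hσ d hd
          have hdnil : d = [] := by
            rcases d with _ | ⟨x, d'⟩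
            · rfl
            · simp at hde
          rw [hdnil] at hm
          simp at hm
        · rw [if_neg hemp]
          have hlc : l ∈ l :: c' := List.mem_cons_self
          have h1 := sumLen_reduceB_lt_same (rest := rest) hlc
          have h2 := sumLen_reduceB_lt_neg (rest := rest) hlc
          rw [Bool.or_eq_true, ih _ (by omega), ih _ (by omega)]
          exact (split_iff ((l :: c') :: rest) l).symm

theorem B_iff (clauses : List (List Int)) :
    resolution_sat_alt clauses = true ↔ Sat (clauses.filter (fun c => !(c.isEmpty))) := by
  rw [resolution_sat_alt]
  exact solveB_iff _ _ (by omega)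

-- ===== VERDICT (by name: the statement is the Claim_ definition above) =====
theorem resolution_sat_spec : Claim_equal_resolution_sat := by
  intro clauses _hdom
  unfold Spec_resolution_sat
  have h : resolution_sat clauses = true ↔ resolution_sat_alt clauses = true :=
    ((A_iff clauses).trans (sat_init_iff clauses)).trans (B_iff clauses).symm
  cases hA : resolution_sat clauses <;> cases hB : resolution_sat_alt clauses <;> simp_all
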